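-- pv_equiv track=rewrite | github.com/YufeiHu/Online-Accessment | Linkedin/movie_ratings.py | maxSumSubarrayRemovingOneEle
-- ===== SOURCE A (Python) =====
-- def maxSumSubarrayRemovingOneEle(arr, n):
--     # Maximum sum subarrays in forward and backward
--     # directions
--     fw = [0 for k in range(n)]
--     bw = [0 for k in range(n)]
--
--     # Initialize current max and max so far.
--     cur_max, max_so_far = arr[0], arr[0]
--
--     # calculating maximum sum subarrays in forward
--     # direction
--     for i in range(n):
--         cur_max = max(arr[i], cur_max + arr[i])
--         max_so_far = max(max_so_far, cur_max)
--
--         # storing current maximum till ith, in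
--         # forward array
--         fw[i] = cur_max
--
--         # calculating maximum sum subarrays in backward
--     # direction
--     cur_max = max_so_far = bw[n - 1] = arr[n - 1]
--     i = n - 2
--     while i >= 0:
--         cur_max = max(arr[i], cur_max + arr[i])
--         max_so_far = max(max_so_far, cur_max)
--
--         # storing current maximum from ith, in
--         # backward array
--         bw[i] = cur_max
--         i -= 1
--
--     #  Initializing final ans by max_so_far so that,
--     #  case when no element is removed to get max sum
--     #  subarray is also handled
--     fans = max_so_far
--
--     #  choosing maximum ignoring ith element
--     for i in range(1, n - 1):
--         fans = max(fans, fw[i - 1] + bw[i + 1])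
--
--     return fans
-- ===== SOURCE B (Python) =====
-- def maxSumSubarrayRemovingOneEle(arr, n):
--     # One left-to-right pass, O(1) extra space: classic Kadane with one
--     # allowed deletion.
--     # end_no_delete: best sum ending here with nothing removed;
--     # end_one_delete: best sum ending here with at most one removal
--     end_no_delete = end_one_delete = best = arr[0]
--     for i in range(1, n):
--         x = arr[i]
--         end_one_delete = max(end_no_delete, end_one_delete + x)
--         end_no_delete = max(x, end_no_delete + x)
--         best = max(best, end_no_delete, end_one_delete)
--     return best
-- ===== Notes on version B (the rewrite author's own statement) =====
-- stated objective: simpler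
-- what changed: A builds forward and backward Kadane arrays in three index loops and combines them; B is the standard single-pass one-deletion Kadane keeping three scalars in O(1) extra space (no array allocation).
-- intended difference: On inputs (arr[0] > 0 and n >= 3) where a remove-one-element candidate whose kept left part starts at index 0, inflated by an extra copy of arr[0], strictly beats every genuine candidate, A returns that inflated value because it seeds its forward Kadane scan with arr[0] and so counts arr[0] twice; B returns the true maximum subarray sum with at most one element removed, the intended value. — e.g. on maxSumSubarrayRemovingOneEle([1, -100, 1], 3): A returns 3, B returns 2
import Mathlib
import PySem

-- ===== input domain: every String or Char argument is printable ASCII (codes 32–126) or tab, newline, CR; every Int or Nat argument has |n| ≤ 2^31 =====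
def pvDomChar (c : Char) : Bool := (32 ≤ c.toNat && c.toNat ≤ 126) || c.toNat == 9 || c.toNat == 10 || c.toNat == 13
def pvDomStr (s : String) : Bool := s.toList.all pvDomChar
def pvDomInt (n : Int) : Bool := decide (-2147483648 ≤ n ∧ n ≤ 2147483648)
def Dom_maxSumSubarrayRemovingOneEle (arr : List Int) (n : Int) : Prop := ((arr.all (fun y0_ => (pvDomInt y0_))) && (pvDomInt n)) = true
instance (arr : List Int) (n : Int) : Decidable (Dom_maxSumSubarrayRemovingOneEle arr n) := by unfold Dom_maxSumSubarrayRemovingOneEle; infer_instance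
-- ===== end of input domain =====

-- B replaces A's forward/backward arrays and three index loops by the standard
-- single-pass one-deletion Kadane with three scalars (objective: simpler, O(1)
-- extra space); on the inputs of D_ below, where A's arr[0]-seeded forward scan
-- counts arr[0] twice and that inflated candidate wins, B returns the true
-- maximum instead (intended difference).

-- ===== PORT A =====
def maxSumSubarrayRemovingOneEle (arr : List Int) (n : Int) : Int :=
  let fw0 := (PySem.List.pyRange 0 n 1).map (fun _ => (0 : Int))
  let bw0 := (PySem.List.pyRange 0 n 1).map (fun _ => (0 : Int))
  let cur_max := PySem.List.pyGetD arr 0 0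
  let max_so_far := PySem.List.pyGetD arr 0 0
  let s1 : Int × Int × List Int := (PySem.List.pyRange 0 n 1).foldl
    (fun (s : Int × Int × List Int) i =>
      let cur := max (PySem.List.pyGetD arr i 0) (s.1 + PySem.List.pyGetD arr i 0)
      (cur, max s.2.1 cur, PySem.List.pySetD s.2.2 i cur))
    (cur_max, max_so_far, fw0)
  let fw := s1.2.2
  let last := PySem.List.pyGetD arr (n - 1) 0
  let bw1 := PySem.List.pySetD bw0 (n - 1) last
  let s2 : Int × Int × List Int := (PySem.List.pyRange (n - 2) (-1) (-1)).foldl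
    (fun (s : Int × Int × List Int) i =>
      let cur := max (PySem.List.pyGetD arr i 0) (s.1 + PySem.List.pyGetD arr i 0)
      (cur, max s.2.1 cur, PySem.List.pySetD s.2.2 i cur))
    (last, last, bw1)
  let bw := s2.2.2
  let fans := s2.2.1
  (PySem.List.pyRange 1 (n - 1) 1).foldl
    (fun fans i => max fans (PySem.List.pyGetD fw (i - 1) 0 + PySem.List.pyGetD bw (i + 1) 0))
    fans

-- ===== PORT B =====
-- state = (end_no_delete, end_one_delete, best); the loop body updates
-- end_one_delete from the previous end_no_delete, then end_no_delete, then best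
def maxSumSubarrayRemovingOneEle_alt (arr : List Int) (n : Int) : Int :=
  let st := List.foldl
    (fun st i =>
      let x := PySem.List.pyGetD arr i 0
      let e1 := st.1 ⊔ (st.2.1 + x)
      let e0 := x ⊔ (st.1 + x)
      (e0, e1, st.2.2 ⊔ e0 ⊔ e1))
    (PySem.List.pyGetD arr 0 0, PySem.List.pyGetD arr 0 0, PySem.List.pyGetD arr 0 0)
    (PySem.List.pyRange 1 n 1)
  st.2.2

-- ===== PRECONDITION & SPEC =====
-- Pre_: exactly the inputs where the Python A returns normally: A indexes arr[0],
-- arr[n-1], bw[n-1] and arr[i] for i < n, so it raises IndexError unless 1 ≤ n ≤ len(arr).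
def Pre_maxSumSubarrayRemovingOneEle (arr : List Int) (n : Int) : Prop :=
  1 ≤ n ∧ n ≤ arr.length
instance (arr : List Int) (n : Int) : Decidable (Pre_maxSumSubarrayRemovingOneEle arr n) := by
  unfold Pre_maxSumSubarrayRemovingOneEle; infer_instance
def pvWitness_maxSumSubarrayRemovingOneEle : List Int × Int := ([2, -1, 3, -4, 5], 5)

-- value of A's arr[0]-seeded remove-one candidate: an extra copy of arr[0],
-- the prefix up to index k, skip index k+1, then indices k+2..j
def pvSeeded (xs : List Int) (k j : ℕ) : Int :=
  xs.headD 0 + (xs.take (k+1)).sum + ((xs.drop (k+2)).take (j-k-1)).sum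
-- value of the genuine subarray candidate xs[a..a+l]
def pvSegV (xs : List Int) (a l : ℕ) : Int := ((xs.drop a).take (l+1)).sum
-- value of the genuine remove-one candidate xs[a..k] + xs[k+2..j]
def pvGDelV (xs : List Int) (a k j : ℕ) : Int :=
  ((xs.drop a).take (k+1-a)).sum + ((xs.drop (k+2)).take (j-k-1)).sum

-- On inputs where some arr[0]-seeded remove-one candidate (an extra copy of arr[0],
-- only possible when arr[0] > 0 and n ≥ 3) strictly beats every genuine subarray and
-- remove-one candidate, A returns that inflated value (its forward Kadane scan is
-- seeded with arr[0] and counts it twice); B returns the true maximum, the intended value.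
def D_maxSumSubarrayRemovingOneEle (arr : List Int) (n : Int) : Prop :=
  1 ≤ n ∧ n ≤ arr.length ∧
  ∃ j ∈ List.range n.toNat, ∃ k ∈ List.range j, k + 2 ≤ j ∧
    (∀ a ∈ List.range n.toNat, ∀ l ∈ List.range n.toNat, a + l < n.toNat →
      pvSegV (arr.take n.toNat) a l < pvSeeded (arr.take n.toNat) k j) ∧
    (∀ a ∈ List.range n.toNat, ∀ k' ∈ List.range n.toNat, ∀ j' ∈ List.range n.toNat,
      a ≤ k' → k' + 2 ≤ j' → pvGDelV (arr.take n.toNat) a k' j' < pvSeeded (arr.take n.toNat) k j)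
instance (arr : List Int) (n : Int) : Decidable (D_maxSumSubarrayRemovingOneEle arr n) := by
  unfold D_maxSumSubarrayRemovingOneEle; infer_instance

def Spec_maxSumSubarrayRemovingOneEle (arr : List Int) (n : Int) (out : Int) : Prop := ¬ D_maxSumSubarrayRemovingOneEle arr n → out = maxSumSubarrayRemovingOneEle_alt arr n
instance (arr : List Int) (n : Int) (out : Int) : Decidable (Spec_maxSumSubarrayRemovingOneEle arr n out) := by unfold Spec_maxSumSubarrayRemovingOneEle; infer_instance

def pvDiffWitness_maxSumSubarrayRemovingOneEle : List Int × Int := ([1, -100, 1], 3)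
def pvDiffWitnessOut_maxSumSubarrayRemovingOneEle : Int × Int := (3, 2)

-- ===== CLAIM (what is proved, stated in full; the proofs are below) =====
def Claim_unchanged_maxSumSubarrayRemovingOneEle : Prop := ∀ (arr : List Int) (n : Int), Dom_maxSumSubarrayRemovingOneEle arr n → Pre_maxSumSubarrayRemovingOneEle arr n → Spec_maxSumSubarrayRemovingOneEle arr n (maxSumSubarrayRemovingOneEle arr n)
def Claim_changed_maxSumSubarrayRemovingOneEle : Prop := Dom_maxSumSubarrayRemovingOneEle (pvDiffWitness_maxSumSubarrayRemovingOneEle.1) (pvDiffWitness_maxSumSubarrayRemovingOneEle.2) ∧ Pre_maxSumSubarrayRemovingOneEle (pvDiffWitness_maxSumSubarrayRemovingOneEle.1) (pvDiffWitness_maxSumSubarrayRemovingOneEle.2) ∧ D_maxSumSubarrayRemovingOneEle (pvDiffWitness_maxSumSubarrayRemovingOneEle.1) (pvDiffWitness_maxSumSubarrayRemovingOneEle.2) ∧ maxSumSubarrayRemovingOneEle (pvDiffWitness_maxSumSubarrayRemovingOneEle.1) (pvDiffWitness_maxSumSubarrayRemovingOneEle.2) = pvDiffWitnessOut_maxSumSubarrayRemovingOneEle.1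 ∧ maxSumSubarrayRemovingOneEle_alt (pvDiffWitness_maxSumSubarrayRemovingOneEle.1) (pvDiffWitness_maxSumSubarrayRemovingOneEle.2) = pvDiffWitnessOut_maxSumSubarrayRemovingOneEle.2 ∧ pvDiffWitnessOut_maxSumSubarrayRemovingOneEle.1 ≠ pvDiffWitnessOut_maxSumSubarrayRemovingOneEle.2
def Claim_exact_maxSumSubarrayRemovingOneEle : Prop := ∀ (arr : List Int) (n : Int), Dom_maxSumSubarrayRemovingOneEle arr n → Pre_maxSumSubarrayRemovingOneEle arr n → D_maxSumSubarrayRemovingOneEle arr n → maxSumSubarrayRemovingOneEle arr n ≠ maxSumSubarrayRemovingOneEle_alt arr n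

-- ===== LEMMAS AND PROOFS =====

-- Kadane step
def pvKstep (c x : Int) : Int := max x (c + x)
-- list of running Kadane values starting from carry c
def pvKadFrom (c : Int) : List Int → List Int
  | [] => []
  | x :: t => pvKstep c x :: pvKadFrom (pvKstep c x) t
-- max over sums of nonempty suffixes
def pvMsuf : List Int → Int
  | [] => 0
  | [x] => x
  | x :: y :: t => max (x + (y :: t).sum) (pvMsuf (y :: t))
-- max over sums of nonempty prefixes
def pvMpre : List Int → Int
  | [] => 0
  | [x] => x
  | x :: y :: t => max x (x + pvMpre (y :: t))
-- A's forward ("seeded") Kadane value at index k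
def pvFv (xs : List Int) (k : ℕ) : Int := (xs.take (k + 1)).foldl pvKstep (xs.headD 0)
-- A's backward value at index i
def pvBWv (xs : List Int) (i : ℕ) : Int := pvMpre (xs.drop i)
-- candidate values of A: sums of nonempty segments …
def pvSeg (xs : List Int) (v : Int) : Prop :=
  ∃ a l : ℕ, a + l < xs.length ∧ v = ((xs.drop a).take (l + 1)).sum
-- … and A's "remove one element" candidates: seeded forward value up to k, skip k+1, segment k+2..j
def pvDel (xs : List Int) (v : Int) : Prop :=
  ∃ k j : ℕ, k + 2 ≤ j ∧ j < xs.length ∧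
    v = pvFv xs k + ((xs.drop (k + 2)).take (j - k - 1)).sum
def pvCand (xs : List Int) (v : Int) : Prop := pvSeg xs v ∨ pvDel xs v
-- B's candidates: segments, and genuine remove-one candidates xs[a..k] + xs[k+2..j]
def pvGDel (xs : List Int) (v : Int) : Prop :=
  ∃ a k j : ℕ, a ≤ k ∧ k + 2 ≤ j ∧ j < xs.length ∧ v = pvGDelV xs a k j
def pvCandB (xs : List Int) (v : Int) : Prop := pvSeg xs v ∨ pvGDel xs v

theorem pvMsuf_upper : ∀ (xs : List Int), xs ≠ [] → ∃ a, a < xs.length ∧ pvMsuf xs = (xs.drop a).sum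
  | [], h => absurd rfl h
  | [x], _ => ⟨0, by simp, by simp [pvMsuf]⟩
  | x :: y :: t, _ => by
    rcases pvMsuf_upper (y :: t) (by simp) with ⟨a, ha, he⟩
    rw [show pvMsuf (x :: y :: t) = max (x + (y :: t).sum) (pvMsuf (y :: t)) from rfl]
    rcases max_cases (x + (y :: t).sum) (pvMsuf (y :: t)) with ⟨h, _⟩ | ⟨h, _⟩
    · exact ⟨0, by simp, by rw [h]; simp⟩
    · exact ⟨a + 1, by simpa using ha, by rw [h, he]; rfl⟩

theorem pvMsuf_lower : ∀ (xs : List Int) (a : ℕ), a < xs.length → (xs.drop a).sum ≤ pvMsuf xs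
  | [], a, h => by simp at h
  | [x], a, h => by
    have : a = 0 := by simpa using h
    subst this; simp [pvMsuf]
  | x :: y :: t, a, h => by
    rw [show pvMsuf (x :: y :: t) = max (x + (y :: t).sum) (pvMsuf (y :: t)) from rfl]
    match a with
    | 0 => exact le_max_of_le_left (by simp)
    | a + 1 =>
      exact le_max_of_le_right (pvMsuf_lower (y :: t) a (by simpa using h))

theorem pvMpre_upper : ∀ (xs : List Int), xs ≠ [] → ∃ l, l < xs.length ∧ pvMpre xs = (xs.take (l + 1)).sum
  | [], h => absurd rfl h
  | [x], _ => ⟨0, by simp, by simp [pvMpre]⟩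
  | x :: y :: t, _ => by
    rcases pvMpre_upper (y :: t) (by simp) with ⟨l, hl, he⟩
    rw [show pvMpre (x :: y :: t) = max x (x + pvMpre (y :: t)) from rfl]
    rcases max_cases x (x + pvMpre (y :: t)) with ⟨h, _⟩ | ⟨h, _⟩
    · exact ⟨0, by simp, by rw [h]; simp⟩
    · exact ⟨l + 1, by simpa using hl, by rw [h, he]; simp⟩

theorem pvMpre_lower : ∀ (xs : List Int) (l : ℕ), l < xs.length → (xs.take (l + 1)).sum ≤ pvMpre xs
  | [], l, h => by simp at h
  | [x], l, h => by
    have : l = 0 := by simpa using h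
    subst this; simp [pvMpre]
  | x :: y :: t, l, h => by
    rw [show pvMpre (x :: y :: t) = max x (x + pvMpre (y :: t)) from rfl]
    match l with
    | 0 => exact le_max_of_le_left (by simp)
    | l + 1 => calc (List.take (l + 1 + 1) (x :: y :: t)).sum
          = x + ((y :: t).take (l + 1)).sum := by simp
        _ ≤ x + pvMpre (y :: t) := by
            have := pvMpre_lower (y :: t) l (by simpa using h)
            omega
        _ ≤ _ := le_max_right _ _

theorem pvChain : ∀ (t : List Int) (x : Int) (c : Int),
    (x :: t).foldl pvKstep c = max (c + (x :: t).sum) (pvMsuf (x :: t))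
  | [], x, c => by simp [pvKstep, pvMsuf, max_comm]
  | y :: t, x, c => by
    have ih := pvChain t y (pvKstep c x)
    rw [show (x :: y :: t).foldl pvKstep c = (y :: t).foldl pvKstep (pvKstep c x) from rfl, ih]
    rw [show pvMsuf (x :: y :: t) = max (x + (y :: t).sum) (pvMsuf (y :: t)) from rfl]
    rw [pvKstep, show ((x :: y :: t).sum) = x + (y :: t).sum from by simp]
    omega

theorem pvBWv_step (xs : List Int) (i : ℕ) (h : i + 1 < xs.length) :
    pvBWv xs i = pvKstep (pvBWv xs (i + 1)) (xs.getD i 0) := by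
  have hd : xs.drop i = xs.getD i 0 :: xs.drop (i + 1) := by
    rw [List.getD_eq_getElem xs 0 (by omega), ← List.getElem_cons_drop]
  have h2 : xs.drop (i + 1) ≠ [] := by
    intro he
    have : (xs.drop (i+1)).length = 0 := by rw [he]; rfl
    simp at this
    omega
  rcases List.exists_cons_of_ne_nil h2 with ⟨y, t, hyt⟩
  rw [pvBWv, pvBWv, hd, hyt]
  rw [show pvMpre (xs.getD i 0 :: y :: t) = max (xs.getD i 0) (xs.getD i 0 + pvMpre (y :: t)) from rfl]
  rw [pvKstep]
  omega

theorem pvBWv_last (xs : List Int) (i : ℕ) (h : i + 1 = xs.length) :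
    pvBWv xs i = xs.getD i 0 := by
  have hd : xs.drop i = xs.getD i 0 :: xs.drop (i + 1) := by
    rw [List.getD_eq_getElem xs 0 (by omega), ← List.getElem_cons_drop]
  rw [pvBWv, hd, List.drop_eq_nil_of_le (by omega)]
  rfl

theorem pvKadFrom_getD : ∀ (l : List Int) (c : Int) (k : ℕ), k < l.length →
    (pvKadFrom c l).getD k 0 = (l.take (k + 1)).foldl pvKstep c
  | [], c, k, h => by simp at h
  | x :: t, c, 0, h => by simp [pvKadFrom]
  | x :: t, c, k + 1, h => by
    rw [pvKadFrom]
    simpa using pvKadFrom_getD t (pvKstep c x) k (by simpa using h)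

-- named form of the fold body shared by A's forward and backward loops
def pvAstep (arr : List Int) (s : Int × Int × List Int) (i : Int) : Int × Int × List Int :=
  let cur := max (PySem.List.pyGetD arr i 0) (s.1 + PySem.List.pyGetD arr i 0)
  (cur, max s.2.1 cur, PySem.List.pySetD s.2.2 i cur)

theorem pvFwdLoop (arr : List Int) :
    ∀ (t : List Int) (k : ℕ) (c msf : Int) (P R : List Int),
    (arr.drop k).take t.length = t → k + t.length ≤ arr.length → P.length = k → t.length ≤ R.length →
    (PySem.List.pyRange (k : Int) ((k : Int) + (t.length : Int)) 1).foldl (pvAstep arr) (c, msf, P ++ R)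
    = (t.foldl pvKstep c, (pvKadFrom c t).foldl max msf, P ++ pvKadFrom c t ++ R.drop t.length)
  | [], k, c, msf, P, R, ht, hlen, hP, hR => by
    rw [show ((k:Int) + ((List.length ([]:List Int)) : Int)) = (k:Int) from by simp,
        PySem.List.pyRange_one_eq_nil (le_refl _)]
    simp [pvKadFrom]
  | x :: t', k, c, msf, P, R, ht, hlen, hP, hR => by
    have hkarr : k < arr.length := by simp only [List.length_cons] at hlen; omega
    have hdk : arr.drop k = arr[k] :: arr.drop (k + 1) := List.drop_eq_getElem_cons hkarr
    rw [hdk, List.length_cons, List.take_succ_cons] at ht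
    have hx := List.cons_eq_cons.mp ht
    have hgk : PySem.List.pyGetD arr (k : Int) 0 = x := by
      rw [PySem.List.pyGetD_natCast, List.getD_eq_getElem arr 0 hkarr, hx.1]
    rcases List.exists_cons_of_ne_nil (List.ne_nil_of_length_pos
      (show 0 < R.length by simp only [List.length_cons] at hR; omega)) with ⟨r, R', hRe⟩
    have hcons : PySem.List.pyRange (k : Int) ((k:Int) + ((x :: t').length : Int)) 1
        = (k : Int) :: PySem.List.pyRange ((k:Int)+1) ((k:Int) + ((x :: t').length : Int)) 1 := by
      apply PySem.List.pyRange_one_cons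
      have hlc : (x :: t').length = t'.length + 1 := by simp
      omega
    rw [hcons, List.foldl_cons]
    have hstep : pvAstep arr (c, msf, P ++ R) (k : Int)
        = (pvKstep c x, max msf (pvKstep c x), (P ++ [pvKstep c x]) ++ R') := by
      rw [pvAstep, hgk, PySem.List.pySetD_natCast, hRe, List.set_append, if_neg (by omega)]
      simp [hP, pvKstep]
    rw [hstep]
    have hre : ((k:Int)+1) = ((k + 1 : ℕ) : Int) := by push_cast; ring
    have hre2 : ((k:Int) + ((x :: t').length : Int)) = ((k+1 : ℕ) : Int) + ((t'.length : ℕ) : Int) := by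
      have hlc2 : (x :: t').length = t'.length + 1 := by simp
      omega
    rw [hre2, hre]
    have ih := pvFwdLoop arr t' (k+1) (pvKstep c x) (max msf (pvKstep c x)) (P ++ [pvKstep c x]) R'
      (hx.2) (by simp only [List.length_cons] at hlen; omega) (by simp [hP]) (by rw [hRe] at hR; simp at hR ⊢; omega)
    rw [ih, pvKadFrom]
    simp [hRe]

theorem pvBwdLoop (arr xs : List Int) (hagree : ∀ i : ℕ, i < xs.length → arr.getD i 0 = xs.getD i 0) :
    ∀ (k : ℕ), k + 1 < xs.length → ∀ (msf : Int) (W : List Int), xs.length ≤ W.length →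
    ∃ M : Int,
    (PySem.List.pyRange (k : Int) (-1) (-1)).foldl (pvAstep arr) (pvBWv xs (k+1), msf, W)
    = (pvBWv xs 0, M, ((List.range (k+1)).map (fun i => pvBWv xs i)) ++ W.drop (k+1))
    ∧ (M = msf ∨ ∃ i, i ≤ k ∧ M = pvBWv xs i)
    ∧ msf ≤ M ∧ (∀ i, i ≤ k → pvBWv xs i ≤ M) := by
  intro k
  induction k with
  | zero =>
    intro hk msf W hW
    have hg : PySem.List.pyGetD arr ((0:ℕ):Int) 0 = xs.getD 0 0 := by
      rw [PySem.List.pyGetD_natCast]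
      exact hagree 0 (by omega)
    have hstep : pvAstep arr (pvBWv xs (0+1), msf, W) ((0:ℕ):Int)
        = (pvBWv xs 0, max msf (pvBWv xs 0), W.set 0 (pvBWv xs 0)) := by
      rw [pvAstep, hg, PySem.List.pySetD_natCast]
      rw [show max (xs.getD 0 0) (pvBWv xs (0+1) + xs.getD 0 0) = pvBWv xs 0 from by
        rw [pvBWv_step xs 0 hk, pvKstep]; try omega]
    rcases List.exists_cons_of_ne_nil (List.ne_nil_of_length_pos
      (show 0 < W.length by omega)) with ⟨w, W', hWe⟩
    refine ⟨max msf (pvBWv xs 0), ?_, ?_, le_max_left _ _, ?_⟩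
    · rw [show PySem.List.pyRange ((0:ℕ):Int) (-1) (-1) = ((0:ℕ):Int) :: PySem.List.pyRange (((0:ℕ):Int)-1) (-1) (-1) from
        PySem.List.pyRange_neg_one_cons (by omega), List.foldl_cons, hstep,
        show (((0:ℕ):Int)-1) = (-1 : Int) from by omega,
        PySem.List.pyRange_neg_one_eq_nil (by omega), List.foldl_nil]
      simp [hWe]
    · rcases max_cases msf (pvBWv xs 0) with ⟨h, _⟩ | ⟨h, _⟩
      · exact Or.inl h
      · exact Or.inr ⟨0, le_refl _, h⟩
    · intro i hi
      have : i = 0 := by omega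
      subst this
      exact le_max_right _ _
  | succ k ih =>
    intro hk msf W hW
    have hk' : k + 1 < xs.length := by omega
    have hWlen : k + 1 < W.length := by omega
    have hg : PySem.List.pyGetD arr ((k+1:ℕ):Int) 0 = xs.getD (k+1) 0 := by
      rw [PySem.List.pyGetD_natCast]
      exact hagree (k+1) (by omega)
    have hstep : pvAstep arr (pvBWv xs (k+1+1), msf, W) ((k+1:ℕ):Int)
        = (pvBWv xs (k+1), max msf (pvBWv xs (k+1)), W.set (k+1) (pvBWv xs (k+1))) := by
      rw [pvAstep, hg, PySem.List.pySetD_natCast]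
      rw [show max (xs.getD (k+1) 0) (pvBWv xs (k+1+1) + xs.getD (k+1) 0) = pvBWv xs (k+1) from by
        rw [pvBWv_step xs (k+1) hk, pvKstep]; try omega]
    rcases ih hk' (max msf (pvBWv xs (k+1))) (W.set (k+1) (pvBWv xs (k+1)))
      (by rw [List.length_set]; exact hW) with ⟨M, hfold, hup, hlow1, hlow2⟩
    refine ⟨M, ?_, ?_, (le_max_left _ _).trans hlow1, ?_⟩
    · rw [show PySem.List.pyRange ((k+1:ℕ):Int) (-1) (-1) = ((k+1:ℕ):Int) :: PySem.List.pyRange (((k+1:ℕ):Int) - 1) (-1) (-1) from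
        PySem.List.pyRange_neg_one_cons (by omega), List.foldl_cons, hstep,
        show (((k+1:ℕ):Int) - 1) = ((k:ℕ):Int) from by omega, hfold]
      congr 1
      congr 1
      rw [show (W.set (k+1) (pvBWv xs (k+1))).drop (k+1) = pvBWv xs (k+1) :: W.drop (k+2) from by
        rw [List.drop_set, if_neg (by omega), Nat.sub_self, List.drop_eq_getElem_cons hWlen,
          List.set_cons_zero, show k+1+1 = k+2 from by omega]]
      rw [show List.range (k+1+1) = List.range (k+1) ++ [k+1] from List.range_succ]
      simp
    · rcases hup with h | ⟨i, hi, he⟩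
      · rcases max_cases msf (pvBWv xs (k+1)) with ⟨h2, _⟩ | ⟨h2, _⟩
        · exact Or.inl (h.trans h2)
        · exact Or.inr ⟨k+1, le_refl _, h.trans h2⟩
      · exact Or.inr ⟨i, by omega, he⟩
    · intro i hi
      rcases Nat.lt_or_ge i (k+1) with h | h
      · exact hlow2 i (by omega)
      · have : i = k + 1 := by omega
        subst this
        exact (le_max_right msf _).trans hlow1

theorem pvGetD_take (arr : List Int) (m i : ℕ) (hi : i < m) (hm : m ≤ arr.length) :
    (arr.take m).getD i 0 = arr.getD i 0 := by
  have h1 : i < (arr.take m).length := by simp; omega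
  have h2 : i < arr.length := by omega
  rw [List.getD_eq_getElem _ _ h1, List.getD_eq_getElem _ _ h2, List.getElem_take]

theorem pvMapRange_getD (f : ℕ → Int) (m j : ℕ) (hj : j < m) :
    ((List.range m).map f).getD j 0 = f j := by
  have h1 : j < ((List.range m).map f).length := by simp; omega
  rw [List.getD_eq_getElem _ _ h1]
  simp

theorem pvSeg_single (xs : List Int) (a : ℕ) (ha : a < xs.length) :
    ((xs.drop a).take 1).sum = xs.getD a 0 := by
  rw [List.getD_eq_getElem _ _ ha, List.drop_eq_getElem_cons ha, List.take_succ_cons,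
    List.take_zero, List.sum_cons, List.sum_nil, add_zero]

theorem pvHeadD_getD (xs : List Int) : xs.headD 0 = xs.getD 0 0 := by
  cases xs <;> rfl

theorem pvAstep_eta (arr : List Int) : (fun (s : Int × Int × List Int) (i : Int) =>
    (max (PySem.List.pyGetD arr i 0) (s.1 + PySem.List.pyGetD arr i 0),
     max s.2.1 (max (PySem.List.pyGetD arr i 0) (s.1 + PySem.List.pyGetD arr i 0)),
     PySem.List.pySetD s.2.2 i (max (PySem.List.pyGetD arr i 0) (s.1 + PySem.List.pyGetD arr i 0))))
    = pvAstep arr := rfl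

theorem pvFoldMax (g : Int → Int) : ∀ (l : List Int) (b : Int),
    (l.foldl (fun acc i => max acc (g i)) b = b ∨ ∃ i ∈ l, l.foldl (fun acc i => max acc (g i)) b = g i)
    ∧ b ≤ l.foldl (fun acc i => max acc (g i)) b
    ∧ ∀ i ∈ l, g i ≤ l.foldl (fun acc i => max acc (g i)) b
  | [], b => ⟨Or.inl rfl, le_refl _, by simp⟩
  | x :: l, b => by
    rcases pvFoldMax g l (max b (g x)) with ⟨hup, hle, hall⟩
    rw [List.foldl_cons]
    refine ⟨?_, ?_, ?_⟩
    · rcases hup with h | ⟨i, hi, he⟩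
      · rcases max_cases b (g x) with ⟨h2, _⟩ | ⟨h2, _⟩
        · exact Or.inl (by rw [h, h2])
        · exact Or.inr ⟨x, by simp, by rw [h, h2]⟩
      · exact Or.inr ⟨i, by simp [hi], he⟩
    · exact (le_max_left _ _).trans hle
    · intro i hi
      rcases List.mem_cons.mp hi with h | h
      · subst h
        exact (le_max_right b _).trans hle
      · exact hall i h

theorem pvA_char (arr : List Int) (n : Int) (h1 : 1 ≤ n) (h2 : n ≤ arr.length) :
    pvCand (arr.take n.toNat) (maxSumSubarrayRemovingOneEle arr n) ∧
    ∀ v, pvCand (arr.take n.toNat) v → v ≤ maxSumSubarrayRemovingOneEle arr n := by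
  have hm1 : 1 ≤ n.toNat := by omega
  have hmlen : n.toNat ≤ arr.length := by omega
  set m := n.toNat with hmdef
  set xs := arr.take m with hxs
  have hxslen : xs.length = m := by rw [hxs]; simp; omega
  have hagree : ∀ i : ℕ, i < xs.length → arr.getD i 0 = xs.getD i 0 := by
    intro i hi
    rw [hxs, pvGetD_take arr m i (by omega) hmlen]
  have hn : n = (m : Int) := by omega
  have ha0 : PySem.List.pyGetD arr 0 0 = xs.headD 0 := by
    rw [PySem.List.pyGetD_zero, pvHeadD_getD, hagree 0 (by omega)]
  have hlen0 : ((PySem.List.pyRange 0 (m:Int) 1).map (fun _ => (0:Int))).length = m := by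
    rw [List.length_map, PySem.List.length_pyRange_one]
    omega
  have hlast' : PySem.List.pyGetD arr ((m:Int) - 1) 0 = pvBWv xs (m-1) := by
    rw [show ((m:Int) - 1) = ((m-1:ℕ):Int) from by omega, PySem.List.pyGetD_natCast,
      hagree (m-1) (by omega), pvBWv_last xs (m-1) (by omega)]
  rw [hn]
  have hBWseg : ∀ i : ℕ, i < m → pvSeg xs (pvBWv xs i) := by
    intro i hi
    have hne : xs.drop i ≠ [] := by
      apply List.ne_nil_of_length_pos
      rw [List.length_drop, hxslen]
      omega
    rcases pvMpre_upper _ hne with ⟨l, hl, he⟩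
    rw [List.length_drop, hxslen] at hl
    exact ⟨i, l, by omega, he⟩
  have hSegle : ∀ (a l : ℕ), a + l < m → ((xs.drop a).take (l+1)).sum ≤ pvBWv xs a := by
    intro a l h
    apply pvMpre_lower
    rw [List.length_drop, hxslen]
    omega
  rcases Nat.lt_or_ge m 2 with hmlt | hm2
  · have hm_eq : m = 1 := by omega
    have e1 : PySem.List.pyRange 0 (1:Int) 1 = [0] := by decide
    have e2 : PySem.List.pyRange (-1:Int) (-1) (-1) = [] := by decide
    have e3 : PySem.List.pyRange 1 (0:Int) 1 = [] := by decide
    have hA1 : maxSumSubarrayRemovingOneEle arr ((m:ℕ):Int) = xs.getD 0 0 := by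
      rw [hm_eq]
      simp only [maxSumSubarrayRemovingOneEle, pvAstep_eta]
      norm_num [e1, e2, e3]
      rw [PySem.List.pyGetD_zero, hagree 0 (by omega)]
      simp [List.getD_eq_getElem?_getD]
    rw [hA1]
    constructor
    · exact Or.inl ⟨0, 0, by omega, by
        rw [show (0:ℕ)+1 = 1 from rfl]
        exact (pvSeg_single xs 0 (by omega)).symm⟩
    · intro v hv
      rcases hv with ⟨a, l, hal, he⟩ | ⟨k, j, hkj, hj, _⟩
      · have ha : a = 0 := by omega
        have hl : l = 0 := by omega
        subst ha; subst hl
        rw [he, show (0:ℕ)+1 = 1 from rfl, pvSeg_single xs 0 (by omega)]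
      · omega
  · have hfwd := pvFwdLoop arr xs 0 (PySem.List.pyGetD arr 0 0) (PySem.List.pyGetD arr 0 0)
      [] ((PySem.List.pyRange 0 ((m:ℕ):Int) 1).map (fun _ => (0:Int)))
      (by rw [List.drop_zero, hxslen])
      (by rw [hxslen]; omega) rfl (by rw [hxslen, hlen0])
    simp only [Nat.cast_zero, zero_add, hxslen, List.nil_append] at hfwd
    rw [List.drop_eq_nil_of_le (by rw [hlen0]), List.append_nil] at hfwd
    rw [ha0] at hfwd
    simp only [maxSumSubarrayRemovingOneEle, pvAstep_eta, ha0, hfwd]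
    rw [hlast']
    rw [show ((m:ℕ):Int) - 1 = ((m-1:ℕ):Int) from by omega, PySem.List.pySetD_natCast]
    have hbwd := pvBwdLoop arr xs hagree (m-2) (by omega) (pvBWv xs (m-1))
      (((PySem.List.pyRange 0 ((m:ℕ):Int) 1).map (fun _ => (0:Int))).set (m-1) (pvBWv xs (m-1)))
      (by rw [List.length_set, hlen0, hxslen])
    rw [show (m-2)+1 = m-1 from by omega] at hbwd
    rcases hbwd with ⟨M, hfold, hMup, hMle1, hMle2⟩
    rw [show ((m:ℕ):Int) - 2 = ((m-2:ℕ):Int) from by omega, hfold]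
    dsimp only
    have hrange : List.range m = List.range (m-1) ++ [m-1] := by
      conv_lhs => rw [show m = m-1+1 from by omega]
      exact List.range_succ
    have hlenW : (((PySem.List.pyRange 0 ((m:ℕ):Int) 1).map (fun _ => (0:Int)))).length = m := hlen0
    have hdropW : ((((PySem.List.pyRange 0 ((m:ℕ):Int) 1).map (fun _ => (0:Int))).set (m-1) (pvBWv xs (m-1)))).drop (m-1) = [pvBWv xs (m-1)] := by
      rw [List.drop_set, if_neg (by omega), Nat.sub_self,
        List.drop_eq_getElem_cons (by rw [hlenW]; omega), List.set_cons_zero,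
        List.drop_eq_nil_of_le (by rw [hlenW]; omega)]
    have hbwlist : (List.range (m-1)).map (fun i => pvBWv xs i) ++ ((((PySem.List.pyRange 0 ((m:ℕ):Int) 1).map (fun _ => (0:Int))).set (m-1) (pvBWv xs (m-1)))).drop (m-1) = (List.range m).map (fun i => pvBWv xs i) := by
      rw [hdropW, hrange, List.map_append, List.map_cons, List.map_nil]
    rw [hbwlist]
    have hfm := pvFoldMax (fun i => PySem.List.pyGetD (pvKadFrom (xs.headD 0) xs) (i-1) 0
        + PySem.List.pyGetD ((List.range m).map (fun i => pvBWv xs i)) (i+1) 0)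
      (PySem.List.pyRange 1 ((m-1:ℕ):Int) 1) M
    simp only at hfm
    have hgval : ∀ q : ℕ, 1 ≤ q → q ≤ m-2 →
        ((q:Int) ∈ PySem.List.pyRange 1 ((m-1:ℕ):Int) 1 ∧
          PySem.List.pyGetD (pvKadFrom (xs.headD 0) xs) ((q:Int)-1) 0
            + PySem.List.pyGetD ((List.range m).map (fun i => pvBWv xs i)) ((q:Int)+1) 0
          = pvFv xs (q-1) + pvBWv xs (q+1)) := by
      intro q hq1 hq2
      constructor
      · rw [PySem.List.mem_pyRange_one]
        omega
      · rw [show ((q:Int)-1) = ((q-1:ℕ):Int) from by omega, PySem.List.pyGetD_natCast,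
          show ((q:Int)+1) = ((q+1:ℕ):Int) from by omega, PySem.List.pyGetD_natCast,
          pvKadFrom_getD xs (xs.headD 0) (q-1) (by rw [hxslen]; omega),
          pvMapRange_getD (fun i => pvBWv xs i) m (q+1) (by omega),
          pvFv, show (q-1)+1 = q from by omega]
    constructor
    · rcases hfm.1 with hM | ⟨i, hi, he⟩
      · rw [hM]
        rcases hMup with h | ⟨i, hi, h⟩
        · exact Or.inl (h ▸ hBWseg (m-1) (by omega))
        · exact Or.inl (h ▸ hBWseg i (by omega))
      · rw [he]
        rw [PySem.List.mem_pyRange_one] at hi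
        have hq : i = ((i.toNat:ℕ):Int) ∧ 1 ≤ i.toNat ∧ i.toNat ≤ m - 2 := by omega
        rcases hq with ⟨hqe, hq1, hq2⟩
        rw [hqe, (hgval i.toNat hq1 hq2).2]
        have hne : xs.drop (i.toNat+1) ≠ [] := by
          apply List.ne_nil_of_length_pos
          rw [List.length_drop, hxslen]
          omega
        rcases pvMpre_upper _ hne with ⟨l, hl, hle⟩
        rw [List.length_drop, hxslen] at hl
        refine Or.inr ⟨i.toNat - 1, i.toNat + 1 + l, by omega, by omega, ?_⟩
        rw [show i.toNat - 1 + 2 = i.toNat + 1 from by omega,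
          show i.toNat + 1 + l - (i.toNat - 1) - 1 = l + 1 from by omega]
        rw [show pvBWv xs (i.toNat+1) = pvMpre (xs.drop (i.toNat+1)) from rfl, hle]
    · intro v hv
      rcases hv with ⟨a, l, hal, he⟩ | ⟨k, j, hkj, hj, he⟩
      · have h1 : v ≤ pvBWv xs a := he ▸ hSegle a l (by rw [hxslen] at hal; omega)
        have h2 : pvBWv xs a ≤ M := by
          rcases Nat.lt_or_ge a (m-1) with h | h
          · exact hMle2 a (by omega)
          · have : a = m-1 := by omega
            exact this ▸ hMle1
        exact (h1.trans h2).trans hfm.2.1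
      · rw [hxslen] at hj
        have h1 : v ≤ pvFv xs k + pvBWv xs (k+2) := by
          rw [he, show j - k - 1 = (j-k-2)+1 from by omega]
          have := hSegle (k+2) (j-k-2) (by omega)
          omega
        have hg := hgval (k+1) (by omega) (by omega)
        rw [show (k+1)-1 = k from by omega, show (k+1)+1 = k+2 from by omega] at hg
        have h3 := hfm.2.2 (((k+1:ℕ)):Int) hg.1
        rw [hg.2] at h3
        exact h1.trans h3

theorem pvSeg_dropSum (w : List Int) (a : ℕ) (ha : a < w.length) : pvSeg w ((w.drop a).sum) := by
  refine ⟨a, w.length - 1 - a, by omega, ?_⟩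
  rw [show (w.length - 1 - a) + 1 = (w.drop a).length from by rw [List.length_drop]; omega,
    List.take_length]

theorem pvFoldGetD {β : Type} (arr : List Int) (f : β → Int → β) :
    ∀ (fuel : ℕ) (a : ℕ) (init : β), a + fuel ≤ arr.length →
    (PySem.List.pyRange (a:Int) ((a + fuel : ℕ):Int) 1).foldl (fun st j => f st (PySem.List.pyGetD arr j 0)) init
    = ((arr.drop a).take fuel).foldl f init
  | 0, a, init, h => by
    rw [show ((a+0:ℕ):Int) = (a:Int) from by omega, PySem.List.pyRange_one_eq_nil (le_refl _)]
    simp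
  | fuel+1, a, init, h => by
    have ha : a < arr.length := by omega
    rw [show PySem.List.pyRange (a:Int) ((a+(fuel+1):ℕ):Int) 1
        = (a:Int) :: PySem.List.pyRange ((a:Int)+1) ((a+(fuel+1):ℕ):Int) 1 from
      PySem.List.pyRange_one_cons (by omega), List.foldl_cons]
    rw [show ((a:Int)+1) = ((a+1:ℕ):Int) from by omega,
      show ((a+(fuel+1):ℕ):Int) = (((a+1)+fuel:ℕ):Int) from by omega]
    rw [pvFoldGetD arr f fuel (a+1) (f init (PySem.List.pyGetD arr (a:Int) 0)) (by omega)]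
    rw [List.drop_eq_getElem_cons ha, List.take_succ_cons, List.foldl_cons]
    rw [PySem.List.pyGetD_natCast, List.getD_eq_getElem arr 0 ha]

-- the loop body of port B, named for the proofs
def pvBstep (st : Int × Int × Int) (x : Int) : Int × Int × Int :=
  let e1 := st.1 ⊔ (st.2.1 + x)
  let e0 := x ⊔ (st.1 + x)
  (e0, e1, st.2.2 ⊔ e0 ⊔ e1)

-- what B's end_one_delete scalar can be: a segment ending at the last index,
-- a segment ending at the second-to-last index, or a genuine remove-one
-- candidate whose right part reaches the last index
def pvE1 (u : List Int) (e1 : Int) : Prop :=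
  (∃ a, a < u.length ∧ e1 = (u.drop a).sum)
  ∨ (∃ a, a + 1 < u.length ∧ e1 = ((u.drop a).take (u.length - 1 - a)).sum)
  ∨ (∃ a k, a ≤ k ∧ k + 3 ≤ u.length ∧ e1 = ((u.drop a).take (k+1-a)).sum + (u.drop (k+2)).sum)

def pvInvB (u : List Int) (st : Int × Int × Int) : Prop :=
  (∃ a, a < u.length ∧ st.1 = (u.drop a).sum)
  ∧ (∀ a, a < u.length → (u.drop a).sum ≤ st.1)
  ∧ pvE1 u st.2.1
  ∧ (∀ a, a + 1 < u.length → ((u.drop a).take (u.length - 1 - a)).sum ≤ st.2.1)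
  ∧ (∀ a k, a ≤ k → k + 3 ≤ u.length → ((u.drop a).take (k+1-a)).sum + (u.drop (k+2)).sum ≤ st.2.1)
  ∧ pvCandB u st.2.2
  ∧ (∀ v, pvCandB u v → v ≤ st.2.2)

theorem pvSeg_ext (u : List Int) (x v : Int) (h : pvSeg u v) : pvSeg (u ++ [x]) v := by
  rcases h with ⟨a, l, hal, he⟩
  refine ⟨a, l, by simp; omega, ?_⟩
  rw [List.drop_append_of_le_length (by omega),
    List.take_append_of_le_length (by rw [List.length_drop]; omega)]
  exact he

theorem pvGDel_ext (u : List Int) (x v : Int) (h : pvGDel u v) : pvGDel (u ++ [x]) v := by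
  rcases h with ⟨a, k, j, hak, hkj, hj, he⟩
  refine ⟨a, k, j, hak, hkj, by simp; omega, ?_⟩
  rw [pvGDelV, List.drop_append_of_le_length (show a ≤ u.length by omega),
    List.take_append_of_le_length (by rw [List.length_drop]; omega),
    List.drop_append_of_le_length (show k + 2 ≤ u.length by omega),
    List.take_append_of_le_length (by rw [List.length_drop]; omega)]
  exact he

theorem pvCandB_ext (u : List Int) (x v : Int) (h : pvCandB u v) : pvCandB (u ++ [x]) v := by
  rcases h with h | h
  · exact Or.inl (pvSeg_ext u x v h)
  · exact Or.inr (pvGDel_ext u x v h)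

theorem pvE1_candB (w : List Int) (v : Int) (h : pvE1 w v) : pvCandB w v := by
  rcases h with ⟨a, ha, he⟩ | ⟨a, ha, he⟩ | ⟨a, k, hak, hk3, he⟩
  · exact Or.inl (he ▸ pvSeg_dropSum w a ha)
  · refine Or.inl ⟨a, w.length - 2 - a, by omega, ?_⟩
    rw [show (w.length - 2 - a) + 1 = w.length - 1 - a from by omega]
    exact he
  · refine Or.inr ⟨a, k, w.length - 1, hak, by omega, by omega, ?_⟩
    rw [pvGDelV, show w.length - 1 - k - 1 = (w.drop (k+2)).length from by
      rw [List.length_drop]; omega, List.take_length]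
    exact he

theorem pvInvB_init (c : Int) : pvInvB [c] (c, c, c) := by
  refine ⟨⟨0, by simp, by simp⟩, ?_, Or.inl ⟨0, by simp, by simp⟩, ?_, ?_,
    Or.inl ⟨0, 0, by simp, by simp⟩, ?_⟩
  · intro a ha
    have : a = 0 := by simp at ha; omega
    subst this; simp
  · intro a ha; simp at ha
  · intro a k _ hk; simp at hk
  · intro v hv
    rcases hv with ⟨a, l, hal, he⟩ | ⟨a, k, j, _, hkj, hj, _⟩
    · have ha : a = 0 := by simp at hal; omega
      have hl : l = 0 := by simp at hal; omega
      subst ha; subst hl; simp at he; exact le_of_eq he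
    · simp at hj; omega

theorem pvInvB_step (u : List Int) (hu : u ≠ []) (st : Int × Int × Int)
    (hinv : pvInvB u st) (x : Int) : pvInvB (u ++ [x]) (pvBstep st x) := by
  obtain ⟨e0, e1, b⟩ := st
  obtain ⟨⟨ea, hea, heq⟩, hlow, he1, hA4, hA5, hbC, hbLow⟩ := hinv
  dsimp only at heq hlow he1 hA4 hA5 hbC hbLow
  have hL : 1 ≤ u.length := List.length_pos_of_ne_nil hu
  set L := u.length with hLdef
  set w := u ++ [x] with hwdef
  have hwlen : w.length = L + 1 := by rw [hwdef]; simp [hLdef]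
  have hdrop : ∀ a : ℕ, a ≤ L → w.drop a = u.drop a ++ [x] := by
    intro a ha
    exact List.drop_append_of_le_length ha
  have hdsum : ∀ a : ℕ, a ≤ L → (w.drop a).sum = (u.drop a).sum + x := by
    intro a ha
    rw [hdrop a ha]; simp
  have htake : ∀ a t : ℕ, a ≤ L → t ≤ L - a → (w.drop a).take t = (u.drop a).take t := by
    intro a t ha ht
    rw [hdrop a ha, List.take_append_of_le_length (by rw [List.length_drop]; omega)]
  have hfull : ∀ a : ℕ, a < L → (u.drop a).take (L - a) = u.drop a := by
    intro a ha
    rw [show L - a = (u.drop a).length from by rw [List.length_drop], List.take_length]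
  have hdropL : (w.drop L).sum = x := by
    rw [hdrop L (le_refl _), List.drop_length]; simp
  -- the new scalars
  have hstep : pvBstep (e0, e1, b) x
      = (max x (e0 + x), max e0 (e1 + x), max b (max (max x (e0 + x)) (max e0 (e1 + x)))) := by
    simp [pvBstep, max_assoc]
  rw [hstep]
  have hC1 : ∃ a, a < w.length ∧ max x (e0 + x) = (w.drop a).sum := by
    rcases max_cases x (e0 + x) with ⟨hm, _⟩ | ⟨hm, _⟩
    · exact ⟨L, by omega, by rw [hm, hdrop L (le_refl _), List.drop_length]; simp⟩
    · exact ⟨ea, by omega, by rw [hm, hdsum ea (by omega), heq]⟩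
  have hC2 : ∀ a, a < w.length → (w.drop a).sum ≤ max x (e0 + x) := by
    intro a ha
    rcases Nat.lt_or_ge a L with h | h
    · rw [hdsum a (by omega)]
      have := hlow a h
      exact le_max_of_le_right (by omega)
    · have : a = L := by omega
      subst this
      rw [hdropL]
      exact le_max_left _ _
  have hC4 : ∀ a, a + 1 < w.length → ((w.drop a).take (w.length - 1 - a)).sum ≤ max e0 (e1 + x) := by
    intro a ha
    have haL : a < L := by omega
    rw [show w.length - 1 - a = L - a from by omega, htake a (L - a) (by omega) (le_refl _),
      hfull a haL]
    exact le_max_of_le_left (hlow a haL)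
  have hC5 : ∀ a k, a ≤ k → k + 3 ≤ w.length →
      ((w.drop a).take (k+1-a)).sum + (w.drop (k+2)).sum ≤ max e0 (e1 + x) := by
    intro a k hak hk3
    rcases Nat.lt_or_ge (k + 3) (L + 1) with h | h
    · -- k + 3 ≤ L : an old candidate extended by x
      rw [htake a (k+1-a) (by omega) (by omega), hdsum (k+2) (by omega)]
      have := hA5 a k hak (by omega)
      exact le_max_of_le_right (by omega)
    · -- k + 2 = L : segment ending at L-2 plus x
      have hkL : k + 2 = L := by omega
      rw [show k + 2 = L from hkL, hdropL,
        htake a (k+1-a) (by omega) (by omega),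
        show k + 1 - a = L - 1 - a from by omega]
      have := hA4 a (by omega)
      exact le_max_of_le_right (by omega)
  have hC3 : pvE1 w (max e0 (e1 + x)) := by
    rcases max_cases e0 (e1 + x) with ⟨hm, _⟩ | ⟨hm, _⟩
    · refine Or.inr (Or.inl ⟨ea, by omega, ?_⟩)
      rw [hm, show w.length - 1 - ea = L - ea from by omega,
        htake ea (L - ea) (by omega) (le_refl _), hfull ea hea, heq]
    · rcases he1 with ⟨a, ha, he⟩ | ⟨a, ha, he⟩ | ⟨a, k, hak, hk3, he⟩
      · exact Or.inl ⟨a, by omega, by rw [hm, hdsum a (by omega), he]⟩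
      · refine Or.inr (Or.inr ⟨a, L - 2, by omega, by omega, ?_⟩)
        rw [hm, he, show L - 2 + 1 - a = L - 1 - a from by omega,
          htake a (L - 1 - a) (by omega) (by omega),
          show L - 2 + 2 = L from by omega, hdropL]
      · refine Or.inr (Or.inr ⟨a, k, hak, by omega, ?_⟩)
        rw [hm, he, htake a (k+1-a) (by omega) (by omega), hdsum (k+2) (by omega)]
        ring
  refine ⟨hC1, hC2, hC3, hC4, hC5, ?_, ?_⟩
  · -- the best-so-far is a candidate
    rcases max_cases b (max (max x (e0 + x)) (max e0 (e1 + x))) with ⟨hm, _⟩ | ⟨hm, _⟩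
    · rw [hm]; exact pvCandB_ext u x b hbC
    · rw [hm]
      rcases max_cases (max x (e0 + x)) (max e0 (e1 + x)) with ⟨hm2, _⟩ | ⟨hm2, _⟩
      · rw [hm2]
        rcases hC1 with ⟨a, ha, he⟩
        exact Or.inl (he ▸ pvSeg_dropSum w a ha)
      · rw [hm2]
        exact pvE1_candB w _ hC3
  · -- every candidate of u ++ [x] is ≤ the new best
    intro v hv
    rcases hv with ⟨a, l, hal, he⟩ | ⟨a, k, j, hak, hkj, hj, he⟩
    · rcases Nat.lt_or_ge (a + l + 1) w.length with h | h
      · -- segment not reaching the new last element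
        have hvu : pvSeg u v := by
          refine ⟨a, l, by omega, ?_⟩
          rw [he, htake a (l+1) (by omega) (by omega)]
        exact le_max_of_le_left (hbLow v (Or.inl hvu))
      · -- segment ending at the new last element
        have hl1 : l + 1 = (w.drop a).length := by rw [List.length_drop]; omega
        rw [he, hl1, List.take_length]
        exact le_max_of_le_right (le_max_of_le_left (hC2 a (by omega)))
    · rcases Nat.lt_or_ge j L with h | h
      · -- remove-one candidate inside u
        have hvu : pvGDel u v := by
          refine ⟨a, k, j, hak, hkj, h, ?_⟩
          rw [he, pvGDelV, pvGDelV, htake a (k+1-a) (by omega) (by omega),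
            htake (k+2) (j-k-1) (by omega) (by omega)]
        exact le_max_of_le_left (hbLow v (Or.inr hvu))
      · -- remove-one candidate reaching the new last element
        have hjL : j = L := by omega
        have hmid : ((w.drop (k+2)).take (j - k - 1)) = w.drop (k+2) := by
          rw [show j - k - 1 = (w.drop (k+2)).length from by rw [List.length_drop]; omega,
            List.take_length]
        rw [he, pvGDelV, hmid]
        exact le_max_of_le_right (le_max_of_le_right (hC5 a k hak (by omega)))

theorem pvInvB_run : ∀ (t u : List Int), u ≠ [] →
    ∀ st, pvInvB u st → pvInvB (u ++ t) (t.foldl pvBstep st)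
  | [], u, _, st, hinv => by simpa using hinv
  | x :: t, u, hu, st, hinv => by
    rw [show u ++ x :: t = (u ++ [x]) ++ t from by simp, List.foldl_cons]
    exact pvInvB_run t (u ++ [x]) (by simp) _ (pvInvB_step u hu st hinv x)

theorem pvB_char (arr : List Int) (n : Int) (h1 : 1 ≤ n) (h2 : n ≤ arr.length) :
    pvCandB (arr.take n.toNat) (maxSumSubarrayRemovingOneEle_alt arr n) ∧
    ∀ v, pvCandB (arr.take n.toNat) v → v ≤ maxSumSubarrayRemovingOneEle_alt arr n := by
  have hm1 : 1 ≤ n.toNat := by omega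
  have hmlen : n.toNat ≤ arr.length := by omega
  set m := n.toNat with hmdef
  set xs := arr.take m with hxs
  have hxslen : xs.length = m := by rw [hxs]; simp; omega
  have hn : n = (m : Int) := by omega
  have ha0 : PySem.List.pyGetD arr 0 0 = xs.headD 0 := by
    rw [PySem.List.pyGetD_zero, pvHeadD_getD]
    have h1' : (0:ℕ) < (arr.take m).length := by simp; omega
    have h2' : (0:ℕ) < arr.length := by omega
    rw [hxs, List.getD_eq_getElem _ _ h1', List.getD_eq_getElem _ _ h2', List.getElem_take]
  have hxne : xs ≠ [] := List.ne_nil_of_length_pos (by omega)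
  have hunf : maxSumSubarrayRemovingOneEle_alt arr n
      = ((PySem.List.pyRange 1 n 1).foldl
          (fun st i => pvBstep st (PySem.List.pyGetD arr i 0))
          (PySem.List.pyGetD arr 0 0, PySem.List.pyGetD arr 0 0, PySem.List.pyGetD arr 0 0)).2.2 := rfl
  rw [hn] at hunf ⊢
  have hrun := pvFoldGetD arr pvBstep (m-1) 1
    (PySem.List.pyGetD arr 0 0, PySem.List.pyGetD arr 0 0, PySem.List.pyGetD arr 0 0) (by omega)
  rw [show (1 + (m-1) : ℕ) = m from by omega, show ((1:ℕ):Int) = (1:Int) from by norm_num] at hrun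
  have hdt : xs.drop 1 = (arr.drop 1).take (m-1) := by rw [hxs, List.drop_take]
  rw [hrun, ← hdt, ha0] at hunf
  have hsplit : [xs.headD 0] ++ xs.drop 1 = xs := by
    rcases List.exists_cons_of_ne_nil hxne with ⟨y, t, hyt⟩
    rw [hyt]
    rfl
  have hfin := pvInvB_run (xs.drop 1) [xs.headD 0] (by simp) _
    (pvInvB_init (xs.headD 0))
  rw [hsplit] at hfin
  obtain ⟨-, -, -, -, -, hbC, hbLow⟩ := hfin
  rw [hunf]
  exact ⟨hbC, hbLow⟩

theorem pvFv_eq (xs : List Int) (k : ℕ) (hne : xs ≠ []) :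
    pvFv xs k = max (xs.headD 0 + (xs.take (k+1)).sum) (pvMsuf (xs.take (k+1))) := by
  rcases List.exists_cons_of_ne_nil hne with ⟨y, t, rfl⟩
  rw [pvFv, List.take_succ_cons]
  exact pvChain (t.take k) y y

theorem pvD_elim (arr : List Int) (n : Int) (hd : D_maxSumSubarrayRemovingOneEle arr n) :
    ∃ k j : ℕ, k + 2 ≤ j ∧ j < n.toNat ∧
      ∀ v, pvCandB (arr.take n.toNat) v → v < pvSeeded (arr.take n.toNat) k j := by
  obtain ⟨h1, h2, j, hjm, k, hkm, hkj, hseg, hgdel⟩ := hd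
  have hxslen : (arr.take n.toNat).length = n.toNat := by simp; omega
  refine ⟨k, j, hkj, List.mem_range.mp hjm, ?_⟩
  intro v hv
  rcases hv with ⟨a, l, hal, he⟩ | ⟨a, k', j', hak, hk2, hj', he⟩
  · rw [hxslen] at hal
    exact he ▸ hseg a (List.mem_range.mpr (by omega)) l (List.mem_range.mpr (by omega)) hal
  · rw [hxslen] at hj'
    exact he ▸ hgdel a (List.mem_range.mpr (by omega)) k' (List.mem_range.mpr (by omega))
      j' (List.mem_range.mpr hj') hak hk2

theorem pvD_notElim (arr : List Int) (n : Int) (h1 : 1 ≤ n) (h2 : n ≤ arr.length)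
    (hnd : ¬ D_maxSumSubarrayRemovingOneEle arr n) :
    ∀ k j : ℕ, k + 2 ≤ j → j < n.toNat →
      ∃ v, pvCandB (arr.take n.toNat) v ∧ pvSeeded (arr.take n.toNat) k j ≤ v := by
  intro k j hkj hj
  have hxslen : (arr.take n.toNat).length = n.toNat := by simp; omega
  by_contra hno
  push_neg at hno
  apply hnd
  refine ⟨h1, h2, j, List.mem_range.mpr hj, k, List.mem_range.mpr (by omega), hkj, ?_, ?_⟩
  · intro a _ l _ hal
    exact hno _ (Or.inl ⟨a, l, by omega, rfl⟩)
  · intro a _ k' _ j' hj'm hak hk2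
    exact hno _ (Or.inr ⟨a, k', j', hak, hk2, by rw [hxslen]; exact List.mem_range.mp hj'm, rfl⟩)

theorem pvSeeded_le_A (arr : List Int) (n : Int) (h1 : 1 ≤ n) (h2 : n ≤ arr.length)
    (k j : ℕ) (hkj : k + 2 ≤ j) (hj : j < n.toNat) :
    pvSeeded (arr.take n.toNat) k j ≤ maxSumSubarrayRemovingOneEle arr n := by
  have hxslen : (arr.take n.toNat).length = n.toNat := by simp; omega
  have hxne : arr.take n.toNat ≠ [] := List.ne_nil_of_length_pos (by omega)
  have hle : pvSeeded (arr.take n.toNat) k j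
      ≤ pvFv (arr.take n.toNat) k + (((arr.take n.toNat).drop (k+2)).take (j-k-1)).sum := by
    rw [pvFv_eq (arr.take n.toNat) k hxne, pvSeeded]
    have := le_max_left ((arr.take n.toNat).headD 0 + ((arr.take n.toNat).take (k+1)).sum)
      (pvMsuf ((arr.take n.toNat).take (k+1)))
    omega
  exact hle.trans ((pvA_char arr n h1 h2).2 _ (Or.inr ⟨k, j, hkj, by omega, rfl⟩))

theorem pvCandB_le_A (arr : List Int) (n : Int) (h1 : 1 ≤ n) (h2 : n ≤ arr.length) :
    ∀ v, pvCandB (arr.take n.toNat) v → v ≤ maxSumSubarrayRemovingOneEle arr n := by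
  set xs := arr.take n.toNat with hxs
  have hxslen : xs.length = n.toNat := by rw [hxs]; simp; omega
  have hxne : xs ≠ [] := List.ne_nil_of_length_pos (by omega)
  intro v hv
  rcases hv with hs | ⟨a, k, j, hak, hkj, hj, he⟩
  · exact (pvA_char arr n h1 h2).2 v (Or.inl hs)
  · have htlen : (xs.take (k+1)).length = k + 1 := by rw [List.length_take]; omega
    have hseg : ((xs.drop a).take (k+1-a)).sum ≤ pvMsuf (xs.take (k+1)) := by
      have := pvMsuf_lower (xs.take (k+1)) a (by omega)
      rw [List.drop_take] at this
      exact this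
    have hle : v ≤ pvFv xs k + ((xs.drop (k+2)).take (j-k-1)).sum := by
      rw [he, pvGDelV, pvFv_eq xs k hxne]
      have := le_max_right (xs.headD 0 + (xs.take (k+1)).sum) (pvMsuf (xs.take (k+1)))
      omega
    exact hle.trans ((pvA_char arr n h1 h2).2 _ (Or.inr ⟨k, j, hkj, hj, rfl⟩))

-- ===== VERDICT (by name: the statements are the Claim_ definitions above) =====
theorem maxSumSubarrayRemovingOneEle_spec : Claim_unchanged_maxSumSubarrayRemovingOneEle := by
  intro arr n _ hpre hnd
  obtain ⟨h1, h2⟩ := hpre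
  have hxslen : (arr.take n.toNat).length = n.toNat := by simp; omega
  have hxne : arr.take n.toNat ≠ [] := List.ne_nil_of_length_pos (by omega)
  have hA := pvA_char arr n h1 h2
  have hB := pvB_char arr n h1 h2
  apply le_antisymm
  · -- A ≤ B
    rcases hA.1 with hs | ⟨k, j, hkj, hj, he⟩
    · exact hB.2 _ (Or.inl hs)
    · rw [he, pvFv_eq (arr.take n.toNat) k hxne]
      rcases max_cases ((arr.take n.toNat).headD 0 + ((arr.take n.toNat).take (k+1)).sum)
        (pvMsuf ((arr.take n.toNat).take (k+1))) with ⟨hm, _⟩ | ⟨hm, _⟩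
      · rw [hm]
        rcases pvD_notElim arr n h1 h2 hnd k j hkj (by omega) with ⟨v, hvC, hvge⟩
        have := hB.2 v hvC
        rw [show (arr.take n.toNat).headD 0 + ((arr.take n.toNat).take (k+1)).sum
              + (((arr.take n.toNat).drop (k+2)).take (j-k-1)).sum
            = pvSeeded (arr.take n.toNat) k j from rfl]
        omega
      · rw [hm]
        have htne : (arr.take n.toNat).take (k+1) ≠ [] := by
          apply List.ne_nil_of_length_pos
          rw [List.length_take]
          omega
        rcases pvMsuf_upper ((arr.take n.toNat).take (k+1)) htne with ⟨a, ha, hval⟩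
        rw [List.length_take] at ha
        rw [hval, List.drop_take]
        exact hB.2 _ (Or.inr ⟨a, k, j, by omega, hkj, hj, rfl⟩)
  · -- B ≤ A
    exact pvCandB_le_A arr n h1 h2 _ hB.1

theorem maxSumSubarrayRemovingOneEle_changed : Claim_changed_maxSumSubarrayRemovingOneEle := by
  unfold Claim_changed_maxSumSubarrayRemovingOneEle
  decide

theorem maxSumSubarrayRemovingOneEle_tight : Claim_exact_maxSumSubarrayRemovingOneEle := by
  intro arr n _ hpre hd
  obtain ⟨h1, h2⟩ := hpre
  rcases pvD_elim arr n hd with ⟨k, j, hkj, hj, hall⟩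
  have hB := pvB_char arr n h1 h2
  have hBlt := hall _ hB.1
  have hsA := pvSeeded_le_A arr n h1 h2 k j hkj hj
  intro heq
  omega
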